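-- pv_equiv track=rewrite | github.com/ross0maha/python-project-49 | brain_games/scripts/brain_progression.py | question_list_to_string
-- ===== SOURCE A (Python) =====
-- def question_list_to_string(list_seq, miss_position) -> str:
--     """
--     Function for prepare random list to question string
--     """
--
--     result = ""
--     for elem in enumerate(list_seq):
--         if elem[0] == miss_position:
--             result += ".. "
--         else:
--             result += str(elem[1]) + " "
--     return result
-- ===== SOURCE B (Python) =====
-- def question_list_to_string(list_seq, miss_position) -> str:
--     """
--     Function for prepare random list to question string
--     """
--     parts = [str(elem) for elem in list_seq]
--     if 0 <= miss_position < len(parts):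
--         parts[miss_position] = ".."
--     if not parts:
--         return ""
--     return " ".join(parts) + " "
-- ===== Notes on version B (the rewrite author's own statement) =====
-- stated objective: faster
-- what changed: Replaces the per-element accumulate-with-branch loop by build-all-then-patch-one: stringify every element in one comprehension, overwrite the masked slot once (guarded in-range, which is exactly when an enumerate index can equal miss_position), and produce the result with a single ' '.join plus the trailing space.
import Mathlib
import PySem

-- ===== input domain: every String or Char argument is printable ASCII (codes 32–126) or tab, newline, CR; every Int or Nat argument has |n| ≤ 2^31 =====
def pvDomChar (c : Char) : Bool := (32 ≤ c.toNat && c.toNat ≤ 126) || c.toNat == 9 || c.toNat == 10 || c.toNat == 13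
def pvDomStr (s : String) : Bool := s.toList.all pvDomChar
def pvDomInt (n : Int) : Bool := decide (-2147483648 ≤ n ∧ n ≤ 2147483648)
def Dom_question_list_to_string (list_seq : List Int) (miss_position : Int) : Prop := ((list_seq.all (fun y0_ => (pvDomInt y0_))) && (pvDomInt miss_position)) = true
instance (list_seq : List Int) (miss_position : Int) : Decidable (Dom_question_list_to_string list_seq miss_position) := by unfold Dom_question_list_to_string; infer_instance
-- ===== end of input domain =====

-- B builds the stringified list once, patches the masked slot, and joins — instead of A's per-element branch while accumulating.


-- ===== PORT A =====
def question_list_to_string (list_seq : List Int) (miss_position : Int) : String :=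
  (PySem.List.enumerate list_seq).foldl
    (fun result elem =>
      if elem.1 = miss_position then result ++ ".. "
      else result ++ PySem.Int.toStr elem.2 ++ " ") ""

-- ===== PORT B =====
def question_list_to_string_alt (list_seq : List Int) (miss_position : Int) : String :=
  let parts := list_seq.map PySem.Int.toStr
  let parts := if 0 ≤ miss_position ∧ miss_position < (parts.length : Int)
               then parts.set miss_position.toNat ".." else parts
  if parts = [] then "" else PySem.Str.join " " parts ++ " "

-- ===== PRECONDITION & SPEC =====
def Spec_question_list_to_string (list_seq : List Int) (miss_position : Int) (out : String) : Prop := out = question_list_to_string_alt list_seq miss_position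
instance (list_seq : List Int) (miss_position : Int) (out : String) : Decidable (Spec_question_list_to_string list_seq miss_position out) := by unfold Spec_question_list_to_string; infer_instance

-- ===== CLAIM (what is proved, stated in full; the proofs are below) =====
def Claim_equal_question_list_to_string : Prop := ∀ (list_seq : List Int) (miss_position : Int), Dom_question_list_to_string list_seq miss_position → Spec_question_list_to_string list_seq miss_position (question_list_to_string list_seq miss_position)

-- ===== LEMMAS AND PROOFS =====

/-- The common character-level description of both outputs: the element at
relative position `mp` is masked, every piece carries a trailing space. -/
def pvBody (mp : Int) : List Int → List Char
  | [] => []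
  | x :: xs => (if mp = 0 then ['.', '.', ' '] else PySem.Int.toChars x ++ [' ']) ++ pvBody (mp - 1) xs

/-- join with a separator AFTER every piece: the char-level shape of both outputs. -/
def pvTJ : List (List Char) → List Char
  | [] => []
  | p :: t => p ++ ' ' :: pvTJ t

theorem pvA_eq (mp : Int) (l : List Int) : ∀ (s : Int) (acc : String),
    ((PySem.List.enumerate l s).foldl
      (fun result elem =>
        if elem.1 = mp then result ++ ".. "
        else result ++ PySem.Int.toStr elem.2 ++ " ") acc).toList
    = acc.toList ++ pvBody (mp - s) l := by
  induction l with
  | nil => intro s acc; simp [PySem.List.enumerate_nil, pvBody]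
  | cons x xs ih =>
    intro s acc
    rw [PySem.List.enumerate_cons, List.foldl_cons]
    by_cases h : s = mp
    · rw [if_pos h, ih]
      have h1 : mp - (s + 1) = -1 := by omega
      have h0 : mp - s = 0 := by omega
      rw [h1, h0]
      have hd : (".. " : String).toList = ['.', '.', ' '] := rfl
      simp [pvBody, hd]
    · rw [if_neg (show ¬ ((s, x).1 = mp) from h), ih]
      have h1 : mp - (s + 1) = mp - s - 1 := by ring
      have h0 : ¬ (mp - s = 0) := by omega
      rw [h1]
      have hs : (" " : String).toList = [' '] := rfl
      simp [pvBody, h0, hs, PySem.Int.toList_toStr]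

theorem pvTJ_eq_join (p : List Char) (t : List (List Char)) :
    pvTJ (p :: t) = PySem.Chars.join [' '] (p :: t) ++ [' '] := by
  induction t generalizing p with
  | nil => simp [pvTJ, PySem.Chars.join_singleton]
  | cons q t ih =>
    show p ++ ' ' :: pvTJ (q :: t) = _
    rw [ih q, PySem.Chars.join_cons_cons]
    simp

theorem pvPatch_eq (l : List Int) : ∀ (mp : Int),
    pvTJ (if 0 ≤ mp ∧ mp < (l.length : Int)
          then (l.map PySem.Int.toChars).set mp.toNat ['.', '.']
          else l.map PySem.Int.toChars)
    = pvBody mp l := by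
  induction l with
  | nil => intro mp; simp [pvTJ, pvBody]
  | cons x xs ih =>
    intro mp
    by_cases h0 : mp = 0
    · subst h0
      rw [if_pos (by simp)]
      have h := ih (-1)
      rw [if_neg (by omega)] at h
      simp [pvTJ, pvBody, h]
    · by_cases hin : 0 ≤ mp ∧ mp < ((x :: xs).length : Int)
      · rw [if_pos hin]
        have hk : mp.toNat = (mp - 1).toNat + 1 := by omega
        rw [List.map_cons, hk, List.set_cons_succ]
        have h := ih (mp - 1)
        rw [if_pos (by simp at hin ⊢; omega), show (mp - 1).toNat = mp.toNat - 1 by omega] at h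
        simp [pvTJ, pvBody, h0, h]
      · rw [if_neg hin]
        have h := ih (mp - 1)
        rw [if_neg (by simp at hin ⊢; omega)] at h
        simp [pvTJ, pvBody, h0, h]

theorem pvMapSet (l : List Int) (mp : Int) :
    ((if 0 ≤ mp ∧ mp < ((l.map PySem.Int.toStr).length : Int)
      then (l.map PySem.Int.toStr).set mp.toNat ".." else l.map PySem.Int.toStr).map String.toList)
    = (if 0 ≤ mp ∧ mp < (l.length : Int)
       then (l.map PySem.Int.toChars).set mp.toNat ['.', '.'] else l.map PySem.Int.toChars) := by
  have hdd : (".." : String).toList = ['.', '.'] := rfl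
  have hlen : ((l.map PySem.Int.toStr).length : Int) = (l.length : Int) := by simp
  rw [hlen]
  by_cases hin : 0 ≤ mp ∧ mp < (l.length : Int) <;>
    simp [hin, List.map_set, hdd, List.map_map, Function.comp_def, PySem.Int.toList_toStr]

theorem pvJoinStr (ps : List String) :
    (if ps = [] then "" else PySem.Str.join " " ps ++ " ").toList = pvTJ (ps.map String.toList) := by
  cases ps with
  | nil => simp [pvTJ]
  | cons p t =>
    rw [if_neg (by simp), List.map_cons, pvTJ_eq_join]
    have hs : (" " : String).toList = [' '] := rfl
    simp [PySem.Str.toList_join, hs]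

theorem pvB_eq (l : List Int) (mp : Int) :
    (question_list_to_string_alt l mp).toList = pvBody mp l := by
  unfold question_list_to_string_alt
  rw [← pvPatch_eq l mp, ← pvMapSet l mp]
  exact pvJoinStr _

-- ===== VERDICT (by name: the statement is the Claim_ definition above) =====
theorem question_list_to_string_spec : Claim_equal_question_list_to_string := by
  intro l mp _
  unfold Spec_question_list_to_string question_list_to_string
  apply String.toList_inj.mp
  rw [pvA_eq mp l 0 "", pvB_eq]
  simp
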